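-- pv_equiv track=rewrite | github.com/rohitkumar7048/crypto-lab | Cryptography Lab/22-10-25 Cryptography Lab 5/Question 2.py | func
-- ===== SOURCE A (Python) =====
-- import math
--
-- def is_prime(n):
--     if n <= 1: return False
--     if n == 2: return True
--     if n % 2 == 0: return False
--     for i in range(3, math.isqrt(n)+1, 2):
--         if(n % i == 0):
--             return False
--     return True
--
-- def func(m):
--     result = []
--     n = 1
--     while len(result) < m:
--         val = n**2 + 1
--         if is_prime(val):
--             result.append(val)
--         n += 1
--     return result
-- ===== SOURCE B (Python) =====
-- def func(m):
--     # Quadratic-residue sieve over doubling blocks: a divisor sieve finds the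
--     # primes below the block end; for each prime p = 2 or p = 1 (mod 4) a root
--     # r of r*r = -1 (mod p) is computed once (via g**((p-1)/4) mod p), and the
--     # two arithmetic progressions n = +-r (mod p) are struck out of the block;
--     # the unmarked n give the primes n*n + 1 in increasing order.
--     if m <= 0:
--         return []
--     result = []
--     lo = 1
--     size = 8
--     while True:
--         hi = lo + size
--         comp = set()
--         for d in range(2, hi):
--             for q in range(2 * d, hi, d):
--                 comp.add(q)
--         marked = set()
--         for p in range(2, hi):
--             if p not in comp:
--                 if p == 2:
--                     root = 1
--                 elif p % 4 == 1:
--                     root = None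
--                     for g in range(2, p):
--                         r = pow(g, (p - 1) // 4, p)
--                         if (r * r + 1) % p == 0:
--                             root = r
--                             break
--                 else:
--                     root = None
--                 if root is not None:
--                     for rr in (root, p - root):
--                         for n in range(lo + (rr - lo) % p, hi, p):
--                             if p <= n:
--                                 marked.add(n)
--         for n in range(lo, hi):
--             if n not in marked:
--                 result.append(n * n + 1)
--                 if len(result) == m:
--                     return result
--         lo = hi
--         size *= 2
-- ===== Notes on version B (the rewrite author's own statement) =====
-- stated objective: faster
-- what changed: B replaces A's per-candidate trial division by a quadratic-residue sieve over doubling blocks: a divisor sieve finds the primes below the block end, a root of r*r = -1 (mod p) is computed once per prime p = 2 or p = 1 (mod 4) via g**((p-1)//4) mod p, and the two progressions n = +-r (mod p) are struck out of the block with a set; unmarked n give the primes n*n+1 in order.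
import Mathlib
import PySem

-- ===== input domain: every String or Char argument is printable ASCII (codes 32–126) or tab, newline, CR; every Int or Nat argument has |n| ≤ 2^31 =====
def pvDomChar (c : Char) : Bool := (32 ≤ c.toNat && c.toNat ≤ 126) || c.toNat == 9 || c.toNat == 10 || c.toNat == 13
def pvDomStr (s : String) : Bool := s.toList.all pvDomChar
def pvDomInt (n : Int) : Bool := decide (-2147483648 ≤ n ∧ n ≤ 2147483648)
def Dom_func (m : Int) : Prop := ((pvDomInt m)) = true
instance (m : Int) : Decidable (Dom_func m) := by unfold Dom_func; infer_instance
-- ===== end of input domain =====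

-- B replaces A's per-candidate trial division by a quadratic-residue sieve over
-- doubling blocks: a divisor sieve finds the primes below the block end, a root r of
-- r*r = -1 (mod p) is computed for each prime p = 2 or p = 1 (mod 4), and the two
-- progressions n = +-r (mod p) are struck out of the block; unmarked n give the primes
-- n*n+1 in order. Both Pythons loop unboundedly until m primes are found; the ports
-- carry fuel for that while-loop (40 doubling blocks for B, the matching 8*(2^40-1)
-- candidate steps for A).

-- ===== PORT A =====
-- math.isqrt(n): exact for 0 ≤ n (A only calls it with n ≥ 3)
def pyIsqrt (n : Int) : Int := Int.ofNat (Nat.sqrt n.toNat)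

-- the 'for i in range(3, isqrt(n)+1, 2): if n % i == 0: return False' loop of is_prime
def isPrimeLoop (n : Int) : List Int → Bool
  | [] => true
  | i :: rest => if PySem.Int.mod n i == 0 then false else isPrimeLoop n rest

def is_prime (n : Int) : Bool :=
  if n ≤ 1 then false
  else if n == 2 then true
  else if PySem.Int.mod n 2 == 0 then false
  else isPrimeLoop n (PySem.List.pyRange 3 (pyIsqrt n + 1) 2)

-- fuel bookkeeping for the two unbounded while-loops: blockFuel K s = s*(2^K - 1)
-- candidate steps = the candidates B's K doubling blocks of first size s cover
def blockFuel : Nat → Nat → Nat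
  | 0, _ => 0
  | K + 1, s => s + blockFuel K (2 * s)

def funcLoopA (m : Int) (result : List Int) (n : Int) : Nat → List Int
  | 0 => result
  | fuel + 1 =>
    if (result.length : Int) < m then
      if is_prime (n ^ 2 + 1) then funcLoopA m (result ++ [n ^ 2 + 1]) (n + 1) fuel
      else funcLoopA m result (n + 1) fuel
    else result

def func (m : Int) : List Int := funcLoopA m [] 1 (blockFuel 40 8)

-- ===== PORT B =====
-- 'comp = set(); for d in range(2, hi): for q in range(2*d, hi, d): comp.add(q)'
def compSieve (hi : Int) : PySem.Set Int :=
  (PySem.List.pyRange 2 hi 1).foldl (fun s d =>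
    (PySem.List.pyRange (2 * d) hi d).foldl (fun s q => PySem.Set.add s q) s)
    (PySem.Set.empty)

-- 'for g in range(2, p): r = pow(g, (p-1)//4, p); if (r*r+1) % p == 0: root = r; break'
def findRootG (p : Int) : List Int → Option Int
  | [] => none
  | g :: rest =>
    let r := PySem.Int.powMod g (PySem.Int.floordiv (p - 1) 4).toNat p
    if PySem.Int.mod (r * r + 1) p == 0 then some r else findRootG p rest

-- the root computation for one prime p (the if/elif/else chain of the body)
def rootOf (p : Int) : Option Int :=
  if p == 2 then some 1
  else if PySem.Int.mod p 4 == 1 then findRootG p (PySem.List.pyRange 2 p 1)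
  else none

-- 'for n in range(lo + (rr - lo) % p, hi, p): if p <= n: marked.add(n)'
def sweep (lo hi p rr : Int) (s : PySem.Set Int) : PySem.Set Int :=
  (PySem.List.pyRange (lo + PySem.Int.mod (rr - lo) p) hi p).foldl
    (fun s n => if p ≤ n then PySem.Set.add s n else s) s

-- the whole marking pass of one block ('comp' is computed once, as in the Python)
def markAll (lo hi : Int) (comp : PySem.Set Int) : PySem.Set Int :=
  (PySem.List.pyRange 2 hi 1).foldl (fun s p =>
    if PySem.Set.contains comp p then s
    else
      match rootOf p with
      | none => s
      | some root => [root, p - root].foldl (fun s rr => sweep lo hi p rr s) s)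
    (PySem.Set.empty)

def markBlock (lo hi : Int) : PySem.Set Int := markAll lo hi (compSieve hi)

-- the collecting loop with its early return: inl = returned from func, inr = fell through
def collectB (m : Int) (marked : PySem.Set Int) : List Int → List Int → Sum (List Int) (List Int)
  | res, [] => Sum.inr res
  | res, n :: rest =>
    if PySem.Set.contains marked n then collectB m marked res rest
    else
      if ((res ++ [n * n + 1]).length : Int) == m then Sum.inl (res ++ [n * n + 1])
      else collectB m marked (res ++ [n * n + 1]) rest

def funcLoopB (m : Int) (res : List Int) (lo size : Int) : Nat → List Int
  | 0 => res
  | K + 1 =>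
    match collectB m (markBlock lo (lo + size)) res (PySem.List.pyRange lo (lo + size) 1) with
    | Sum.inl fin => fin
    | Sum.inr res' => funcLoopB m res' (lo + size) (size * 2) K

def func_alt (m : Int) : List Int :=
  if m ≤ 0 then [] else funcLoopB m [] 1 8 40

-- ===== PRECONDITION & SPEC =====
def Spec_func (m : Int) (out : List Int) : Prop := out = func_alt m
instance (m : Int) (out : List Int) : Decidable (Spec_func m out) := by unfold Spec_func; infer_instance

-- ===== CLAIM (what is proved, stated in full; the proofs are below) =====
def Claim_equal_func : Prop := ∀ (m : Int), Dom_func m → Spec_func m (func m)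

-- ===== LEMMAS AND PROOFS =====

lemma loopA_stall (m : Int) (res : List Int) (n : Int) (f : Nat)
    (h : ¬ ((res.length : Int) < m)) : funcLoopA m res n f = res := by
  cases f with
  | zero => rfl
  | succ f => simp only [funcLoopA, if_neg h]

-- membership through a fold of conditional set insertions
lemma mem_foldl_iff {α : Type} (step : PySem.Set Int → α → PySem.Set Int) (Q : α → Int → Prop)
    (h : ∀ s e x, x ∈ step s e ↔ x ∈ s ∨ Q e x) (l : List α) (s : PySem.Set Int) (x : Int) :
    x ∈ l.foldl step s ↔ x ∈ s ∨ ∃ e ∈ l, Q e x := by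
  induction l generalizing s with
  | nil => simp
  | cons e t ih =>
    simp only [List.foldl_cons, List.exists_mem_cons_iff]
    rw [ih, h]
    tauto

lemma mem_inner (d : Int) (l : List Int) (s : PySem.Set Int) (x : Int) :
    x ∈ l.foldl (fun s n => if d ≤ n then PySem.Set.add s n else s) s ↔
      x ∈ s ∨ ∃ n ∈ l, d ≤ n ∧ x = n := by
  apply mem_foldl_iff
  intro s e x
  split_ifs with hn
  · rw [PySem.Set.mem_add]; tauto
  · tauto

lemma mem_sweep (lo hi p rr x : Int) (s : PySem.Set Int) :
    x ∈ sweep lo hi p rr s ↔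
      x ∈ s ∨ ∃ n ∈ PySem.List.pyRange (lo + PySem.Int.mod (rr - lo) p) hi p, p ≤ n ∧ x = n :=
  mem_inner p _ s x

lemma mem_compSieve (hi x : Int) :
    x ∈ compSieve hi ↔ ∃ d : Int, 2 ≤ d ∧ 2 * d ≤ x ∧ x < hi ∧ d ∣ x := by
  rw [compSieve, mem_foldl_iff _ (fun d x => ∃ q ∈ PySem.List.pyRange (2 * d) hi d, x = q)
    (fun s d x => mem_foldl_iff _ (fun q x => x = q)
      (fun s q x => PySem.Set.mem_add s q x) _ s x)]
  simp only [PySem.Set.empty, List.not_mem_nil, false_or]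
  constructor
  · rintro ⟨d, hdmem, q, hqmem, rfl⟩
    rw [PySem.List.mem_pyRange_one] at hdmem
    rw [PySem.List.mem_pyRange_iff_of_pos (by omega)] at hqmem
    obtain ⟨h1, h2, t, ht⟩ := hqmem
    exact ⟨d, by omega, by omega, by omega, ⟨t + 2, by linear_combination ht⟩⟩
  · rintro ⟨d, h2, h2d, hxh, t, ht⟩
    refine ⟨d, ?_, x, ?_, rfl⟩
    · rw [PySem.List.mem_pyRange_one]; omega
    · rw [PySem.List.mem_pyRange_iff_of_pos (by omega)]
      exact ⟨h2d, hxh, ⟨t - 2, by linear_combination ht⟩⟩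

-- a number 2 ≤ p < hi survives the divisor sieve iff it is prime
lemma not_comp_prime (hi p : Int) (h2 : 2 ≤ p) (hph : p < hi) :
    (PySem.Set.contains (compSieve hi) p = false) ↔ Nat.Prime p.toNat := by
  rw [← Bool.not_eq_true, PySem.Set.contains_iff, mem_compSieve]
  constructor
  · intro h
    rw [Nat.prime_def_lt]
    refine ⟨by omega, fun mm hmm hdvd => ?_⟩
    by_contra hm1
    apply h
    have hmm0 : mm ≠ 0 := by
      rintro rfl
      rw [Nat.zero_dvd] at hdvd
      omega
    refine ⟨(mm : Int), by omega, ?_, hph, ?_⟩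
    · obtain ⟨k, hk⟩ := hdvd
      have hk2 : 2 ≤ k := by
        rcases Nat.lt_or_ge k 2 with hkk | hkk
        · interval_cases k <;> omega
        · exact hkk
      have : 2 * mm ≤ mm * k := by nlinarith
      omega
    · have : (mm : Int) ∣ (p.toNat : Int) := Int.natCast_dvd_natCast.mpr hdvd
      rwa [Int.toNat_of_nonneg (by omega : (0:Int) ≤ p)] at this
  · rintro hprime ⟨d, hd2, h2d, hxh, hdvd⟩
    have hdN : d.toNat ∣ p.toNat := by
      have h' : (d.toNat : Int) ∣ (p.toNat : Int) := by
        rw [Int.toNat_of_nonneg (by omega : (0:Int) ≤ d),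
          Int.toNat_of_nonneg (by omega : (0:Int) ≤ p)]
        exact hdvd
      exact_mod_cast h'
    have := (Nat.prime_def_lt.mp hprime).2 d.toNat (by omega) hdN
    omega

-- whatever the g-scan returns is a verified root
lemma findRootG_some (p : Int) : ∀ (l : List Int) (r : Int), findRootG p l = some r →
    PySem.Int.mod (r * r + 1) p = 0 := by
  intro l
  induction l with
  | nil => intro r h; simp [findRootG] at h
  | cons g rest ih =>
    intro r h
    simp only [findRootG] at h
    split_ifs at h with hc
    · rw [Option.some_inj] at h
      subst h
      exact beq_iff_eq.mp hc
    · exact ih r h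

-- the g-scan succeeds as soon as one candidate verifies
lemma findRootG_isSome (p : Int) : ∀ (l : List Int) (g : Int), g ∈ l →
    PySem.Int.mod ((PySem.Int.powMod g (PySem.Int.floordiv (p - 1) 4).toNat p) *
      (PySem.Int.powMod g (PySem.Int.floordiv (p - 1) 4).toNat p) + 1) p = 0 →
    (findRootG p l).isSome := by
  intro l
  induction l with
  | nil => intro g hg _; simp at hg
  | cons g' rest ih =>
    intro g hg hc
    simp only [findRootG]
    split_ifs with hc'
    · simp
    · rcases List.mem_cons.mp hg with rfl | hmem
      · exact absurd (beq_iff_eq.mpr hc) (by simpa using hc')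
      · exact ih g hmem hc

lemma rootOf_some_root (p root : Int) (h : rootOf p = some root) :
    PySem.Int.mod (root * root + 1) p = 0 := by
  rw [rootOf] at h
  split_ifs at h with h2 h4
  · simp only [beq_iff_eq] at h2
    rw [Option.some_inj] at h
    subst h
    subst h2
    decide
  · exact findRootG_some p _ root h

-- an odd prime dividing a value X*X+1 is 1 mod 4
lemma p4_of_dvd (P X : Nat) (hp : Nat.Prime P) (hodd : P ≠ 2) (hdvd : P ∣ X * X + 1) :
    P % 4 = 1 := by
  haveI : Fact (Nat.Prime P) := ⟨hp⟩
  have hz : ((X * X + 1 : ℕ) : ZMod P) = 0 := (ZMod.natCast_eq_zero_iff _ _).mpr hdvd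
  push_cast at hz
  have hsq : IsSquare (-1 : ZMod P) := ⟨(X : ZMod P), by linear_combination -hz⟩
  have h4 : P % 4 ≠ 3 := ZMod.exists_sq_eq_neg_one_iff.mp hsq
  have h2 : P % 2 = 1 := Nat.odd_iff.mp (hp.odd_of_ne_two hodd)
  omega

-- for a prime p = 1 (mod 4) the g-scan finds a root: a quadratic non-residue g
-- has g^((p-1)/2) = -1, so g^((p-1)/4) squares to -1
lemma rootOf_isSome_of_prime (p : Int) (hp : Nat.Prime p.toNat) (h4 : p % 4 = 1)
    (hp5 : 5 ≤ p) : (rootOf p).isSome := by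
  rw [rootOf, if_neg (by simp; omega),
    if_pos (by simp only [beq_iff_eq]; rw [PySem.Int.mod_eq_emod_of_pos (by omega)]; exact h4)]
  set P : Nat := p.toNat with hP
  have hpP : p = (P : Int) := by omega
  haveI : Fact (Nat.Prime P) := ⟨hp⟩
  haveI : NeZero P := ⟨by omega⟩
  have hP5 : 5 ≤ P := by omega
  have hP4 : P % 4 = 1 := by omega
  obtain ⟨a, ha⟩ := FiniteField.exists_nonsquare (F := ZMod P)
    (by rw [ZMod.ringChar_zmod_n]; omega)
  have ha0 : a ≠ 0 := fun h => ha (h ▸ ⟨0, by ring⟩)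
  have hav : a.val < P := ZMod.val_lt a
  have hav0 : a.val ≠ 0 := fun h => ha0 ((ZMod.val_eq_zero a).mp h)
  have hav1 : a.val ≠ 1 := by
    intro h
    exact ha (by rw [← ZMod.natCast_zmod_val a, h]; exact ⟨1, by norm_num⟩)
  apply findRootG_isSome p _ ((a.val : Int))
  · rw [PySem.List.mem_pyRange_one]; omega
  · -- the verification at g = a.val
    set E : Nat := (P - 1) / 4 with hE
    have hEe : (PySem.Int.floordiv (p - 1) 4).toNat = E := by
      rw [PySem.Int.floordiv_eq_ediv_of_pos (by omega)]
      omega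
    rw [hEe, PySem.Int.mod_eq_zero_iff_dvd, hpP]
    apply (ZMod.intCast_zmod_eq_zero_iff_dvd _ P).mp
    have hr : ((PySem.Int.powMod (a.val : Int) E (P : Int) : Int) : ZMod P) = a ^ E := by
      rw [PySem.Int.powMod_eq_emod _ _ (by omega : (0:Int) < (P : Int))]
      rw [show (((a.val : Int) ^ E % (P : Int) : Int) : ZMod P) =
          (((a.val : Int) ^ E : Int) : ZMod P) from by
        rw [ZMod.intCast_eq_intCast_iff', Int.emod_emod_of_dvd _ dvd_rfl]]
      push_cast
      rw [ZMod.natCast_zmod_val]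
    push_cast
    rw [hr]
    have h2E : E + E = (P - 1) / 2 := by omega
    have hy2 : a ^ ((P - 1) / 2) * a ^ ((P - 1) / 2) = 1 := by
      rw [← pow_add, show (P - 1) / 2 + (P - 1) / 2 = P - 1 from by omega]
      exact ZMod.pow_card_sub_one_eq_one ha0
    have hy1 : a ^ ((P - 1) / 2) ≠ 1 := by
      intro h
      exact ha ((ZMod.euler_criterion P ha0).mpr
        (by rw [show P / 2 = (P - 1) / 2 from by omega]; exact h))
    have hyneg : a ^ ((P - 1) / 2) = -1 := by
      rcases mul_self_eq_one_iff.mp hy2 with h | h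
      · exact absurd h hy1
      · exact h
    calc a ^ E * a ^ E + 1 = a ^ (E + E) + 1 := by rw [pow_add]
      _ = a ^ ((P - 1) / 2) + 1 := by rw [h2E]
      _ = 0 := by rw [hyneg]; ring

-- the congruence class of the sweep start
lemma start_emod (lo p rr : Int) : (lo + (rr - lo) % p) % p = rr % p := by
  conv_rhs => rw [show rr = lo + (rr - lo) from by ring]
  rw [Int.add_emod lo ((rr - lo) % p), Int.add_emod lo (rr - lo),
    Int.emod_emod_of_dvd _ dvd_rfl]

lemma dvd_shift (p x rr : Int) (h1 : p ∣ x - rr) (h2 : p ∣ rr * rr + 1) :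
    p ∣ x * x + 1 := by
  have h : x * x + 1 = (x - rr) * (x + rr) + (rr * rr + 1) := by ring
  rw [h]
  exact dvd_add (Dvd.dvd.mul_right h1 _) h2

-- x in [lo, hi) congruent to rr mod p lies on the swept progression
lemma mem_prog (lo hi p rr x : Int) (hp0 : 0 < p) (hdvd : p ∣ x - rr) (hlx : lo ≤ x)
    (hxh : x < hi) : x ∈ PySem.List.pyRange (lo + PySem.Int.mod (rr - lo) p) hi p := by
  rw [PySem.Int.mod_eq_emod_of_pos hp0, PySem.List.mem_pyRange_iff_of_pos hp0]
  have hxr : x % p = rr % p :=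
    Int.emod_eq_emod_iff_emod_sub_eq_zero.mpr (Int.emod_eq_zero_of_dvd hdvd)
  have hdd : p ∣ x - (lo + (rr - lo) % p) := by
    apply Int.dvd_of_emod_eq_zero
    rw [Int.sub_emod, start_emod, ← hxr, sub_self, Int.zero_emod]
  have hge : lo ≤ lo + (rr - lo) % p := by
    have := Int.emod_nonneg (rr - lo) (by omega : p ≠ 0)
    omega
  have hltd : lo + (rr - lo) % p < lo + p := by
    have := Int.emod_lt_of_pos (rr - lo) hp0
    omega
  have hsle : lo + (rr - lo) % p ≤ x := by
    by_contra hlt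
    push_neg at hlt
    have hpos : 0 < (lo + (rr - lo) % p) - x := by omega
    have := Int.le_of_dvd hpos (dvd_sub_comm.mp hdd)
    omega
  exact ⟨hsle, hxh, hdd⟩

lemma mem_markBlock_raw (lo hi x : Int) :
    x ∈ markBlock lo hi ↔ ∃ p ∈ PySem.List.pyRange 2 hi 1,
      PySem.Set.contains (compSieve hi) p = false ∧ ∃ root, rootOf p = some root ∧
        ∃ rr ∈ [root, p - root],
          ∃ n ∈ PySem.List.pyRange (lo + PySem.Int.mod (rr - lo) p) hi p, p ≤ n ∧ x = n := by
  rw [markBlock, markAll,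
    mem_foldl_iff _
      (fun p x => PySem.Set.contains (compSieve hi) p = false ∧ ∃ root, rootOf p = some root ∧
        ∃ rr ∈ [root, p - root],
          ∃ n ∈ PySem.List.pyRange (lo + PySem.Int.mod (rr - lo) p) hi p, p ≤ n ∧ x = n)
      (fun s p x => by
        split_ifs with hc
        · constructor
          · exact Or.inl
          · rintro (h | ⟨hcf, -⟩)
            · exact h
            · rw [hcf] at hc; exact absurd hc (by decide)
        · have hcf : PySem.Set.contains (compSieve hi) p = false := by
            revert hc; cases PySem.Set.contains (compSieve hi) p <;> simp
          cases hro : rootOf p with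
          | none =>
            constructor
            · exact Or.inl
            · rintro (h | ⟨-, root', hr', -⟩)
              · exact h
              · rw [hro] at hr'; exact absurd hr' (by simp)
          | some root =>
            simp only [List.foldl_cons, List.foldl_nil]
            rw [mem_sweep, mem_sweep, hro]
            constructor
            · rintro ((h | h) | h)
              · exact Or.inl h
              · exact Or.inr ⟨hcf, root, rfl, root, by simp, h⟩
              · exact Or.inr ⟨hcf, root, rfl, p - root, by simp, h⟩
            · rintro (h | ⟨-, root', hr', rr, hrrmem, h⟩)
              · exact Or.inl (Or.inl h)
              · rw [Option.some_inj] at hr'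
                subst hr'
                rcases List.mem_cons.mp hrrmem with rfl | hm
                · exact Or.inl (Or.inr h)
                · rcases List.mem_cons.mp hm with rfl | hm2
                  · exact Or.inr h
                  · simp at hm2)]
  simp [PySem.Set.empty]

-- x is marked in the block iff x*x+1 has a divisor d with 2 ≤ d ≤ x
lemma mem_markBlock (lo hi x : Int) (hx1 : 1 ≤ x) (hlx : lo ≤ x) (hxh : x < hi) :
    x ∈ markBlock lo hi ↔ ∃ d : Int, 2 ≤ d ∧ d ≤ x ∧ d ∣ (x * x + 1) := by
  rw [mem_markBlock_raw]
  constructor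
  · rintro ⟨p, hpmem, hcf, root, hro, rr, hrrmem, n, hnmem, hpn, rfl⟩
    rw [PySem.List.mem_pyRange_one] at hpmem
    have hp0 : (0:Int) < p := by omega
    have hroot := rootOf_some_root p root hro
    rw [PySem.Int.mod_eq_zero_iff_dvd] at hroot
    have hrr : p ∣ rr * rr + 1 := by
      rcases List.mem_cons.mp hrrmem with rfl | hm
      · exact hroot
      · rcases List.mem_cons.mp hm with rfl | hm2
        · have h : (p - root) * (p - root) + 1 = p * (p - 2 * root) + (root * root + 1) := by
            ring
          rw [h]
          exact dvd_add (Dvd.intro _ rfl) hroot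
        · simp at hm2
    rw [PySem.Int.mod_eq_emod_of_pos hp0, PySem.List.mem_pyRange_iff_of_pos hp0] at hnmem
    obtain ⟨hs, hh, hd⟩ := hnmem
    have hxr : p ∣ x - rr := by
      apply Int.dvd_of_emod_eq_zero
      have h1 : x % p = (lo + (rr - lo) % p) % p :=
        Int.emod_eq_emod_iff_emod_sub_eq_zero.mpr (Int.emod_eq_zero_of_dvd hd)
      rw [Int.sub_emod, h1, start_emod, sub_self, Int.zero_emod]
    exact ⟨p, by omega, hpn, dvd_shift p x rr hxr hrr⟩
  · rintro ⟨d, hd2, hdx, hdvd⟩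
    set X : Nat := x.toNat with hX
    have hxX : x = (X : Int) := by omega
    have hX1 : 1 ≤ X := by omega
    have hcast : x * x + 1 = ((X * X + 1 : Nat) : Int) := by rw [hxX]; push_cast; ring
    have hdN : d.toNat ∣ X * X + 1 := by
      have h' : (d.toNat : Int) ∣ ((X * X + 1 : Nat) : Int) := by
        rw [Int.toNat_of_nonneg (by omega : (0:Int) ≤ d), ← hcast]
        exact hdvd
      exact_mod_cast h'
    have hXlt : X < X * X + 1 := by nlinarith
    have hVnp : ¬ (X * X + 1).Prime := by
      intro hp
      have := (Nat.prime_def_lt.mp hp).2 d.toNat (by omega) hdN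
      omega
    set P : Nat := (X * X + 1).minFac with hPdef
    have hp : P.Prime := Nat.minFac_prime (by omega)
    have hPdvd : P ∣ X * X + 1 := Nat.minFac_dvd _
    have hPsq : P * P ≤ X * X + 1 := by
      have h := Nat.minFac_sq_le_self (by omega : 0 < X * X + 1) hVnp
      nlinarith [h]
    have hPX : P ≤ X := by nlinarith [hp.two_le]
    have hp2le : 2 ≤ P := hp.two_le
    have hpx : (P : Int) ≤ x := by rw [hxX]; exact_mod_cast hPX
    have hpdvdI : (P : Int) ∣ x * x + 1 := by
      rw [hcast]
      exact_mod_cast hPdvd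
    have hsome : (rootOf (P : Int)).isSome := by
      by_cases hP2 : P = 2
      · rw [hP2]; decide
      · have h41 : P % 4 = 1 := p4_of_dvd P X hp hP2 hPdvd
        apply rootOf_isSome_of_prime (P : Int) (by simpa using hp) ?_ ?_
        · rw [show ((P : Int) % 4) = ((P % 4 : Nat) : Int) from by push_cast; omega]
          omega
        · have : P ≠ 2 ∧ P ≠ 3 ∧ P ≠ 4 := ⟨hP2, by omega, by omega⟩
          omega
    obtain ⟨root, hro⟩ := Option.isSome_iff_exists.mp hsome
    have hroot := rootOf_some_root (P : Int) root hro
    rw [PySem.Int.mod_eq_zero_iff_dvd] at hroot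
    have hcases : (P : Int) ∣ x - root ∨ (P : Int) ∣ x + root := by
      have hprod : (P : Int) ∣ (x - root) * (x + root) := by
        have h : (x - root) * (x + root) = (x * x + 1) - (root * root + 1) := by ring
        rw [h]
        exact dvd_sub hpdvdI hroot
      rcases Int.Prime.dvd_mul hp hprod with h | h
      · exact Or.inl (Int.dvd_natAbs.mp (Int.natCast_dvd_natCast.mpr h))
      · exact Or.inr (Int.dvd_natAbs.mp (Int.natCast_dvd_natCast.mpr h))
    refine ⟨(P : Int), ?_, ?_, root, hro, ?_⟩
    · rw [PySem.List.mem_pyRange_one]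
      constructor
      · exact_mod_cast hp2le
      · omega
    · exact (not_comp_prime hi (P : Int) (by exact_mod_cast hp2le) (by omega)).mpr
        (by simpa using hp)
    · rcases hcases with h | h
      · exact ⟨root, by simp, x,
          mem_prog lo hi (P : Int) root x (by exact_mod_cast hp.pos) h hlx hxh, hpx, rfl⟩
      · refine ⟨(P : Int) - root, by simp, x, ?_, hpx, rfl⟩
        apply mem_prog lo hi (P : Int) ((P : Int) - root) x (by exact_mod_cast hp.pos) ?_ hlx hxh
        rw [show x - ((P : Int) - root) = (x + root) - (P : Int) from by ring]
        exact dvd_sub h (dvd_refl _)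

lemma isPrimeLoop_false_iff (v : Int) (l : List Int) :
    isPrimeLoop v l = false ↔ ∃ i ∈ l, PySem.Int.mod v i = 0 := by
  induction l with
  | nil => simp [isPrimeLoop]
  | cons i rest ih =>
    simp only [isPrimeLoop]
    split_ifs with h
    · simp only [beq_iff_eq] at h
      simp [h]
    · simp only [beq_iff_eq] at h
      simp [ih, h]

lemma pyIsqrt_sq_succ (n : Int) (hn : 1 ≤ n) : pyIsqrt (n * n + 1) = n := by
  obtain ⟨N, rfl⟩ : ∃ N : Nat, n = (N : Int) := ⟨n.toNat, (Int.toNat_of_nonneg (by omega)).symm⟩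
  have hN : 1 ≤ N := by exact_mod_cast hn
  have htn : ((N : Int) * N + 1).toNat = N * N + 1 := by
    rw [show ((N : Int) * N + 1) = ((N * N + 1 : Nat) : Int) by push_cast; ring, Int.toNat_natCast]
  rw [pyIsqrt, htn]
  have h1 : N ≤ Nat.sqrt (N * N + 1) := Nat.le_sqrt.mpr (by omega)
  have h2 : Nat.sqrt (N * N + 1) < N + 1 := Nat.sqrt_lt.mpr (by nlinarith)
  have h3 : Nat.sqrt (N * N + 1) = N := by omega
  rw [h3]
  rfl

-- A's primality test succeeds exactly when n*n+1 has no divisor d with 2 ≤ d ≤ n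
lemma is_prime_iff (n : Int) (hn : 1 ≤ n) :
    is_prime (n ^ 2 + 1) = true ↔ ¬ ∃ d : Int, 2 ≤ d ∧ d ≤ n ∧ d ∣ (n * n + 1) := by
  have hsq : n ^ 2 + 1 = n * n + 1 := by ring
  rw [hsq]
  by_cases h1 : n = 1
  · subst h1
    constructor
    · rintro - ⟨d, h2, hle, -⟩; omega
    · intro _; decide
  have hn2 : 2 ≤ n := by omega
  set v : Int := n * n + 1 with hv
  have hv5 : 5 ≤ v := by nlinarith
  by_cases hpar : n % 2 = 1
  · -- odd n: v is even, A rejects at the mod-2 test, and d = 2 is a witness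
    obtain ⟨k, hk⟩ : ∃ k, n = 2 * k + 1 := ⟨n / 2, by omega⟩
    have hve : v = 2 * (2 * k * k + 2 * k + 1) := by rw [hv, hk]; ring
    have hmod : PySem.Int.mod v 2 = 0 := by
      rw [PySem.Int.mod_eq_emod_of_pos (by omega), hve]; omega
    rw [is_prime, if_neg (by omega), if_neg (by simp; omega)]
    simp only [hmod, beq_self_eq_true, if_true]
    simp only [Bool.false_eq_true, false_iff, not_not]
    exact ⟨2, le_refl 2, hn2, ⟨2 * k * k + 2 * k + 1, hve⟩⟩
  · -- even n: v is odd; the trial loop runs over the odd i in [3, n]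
    obtain ⟨k, hk⟩ : ∃ k, n = 2 * k := ⟨n / 2, by omega⟩
    have hvo : v = 2 * (2 * k * k) + 1 := by rw [hv, hk]; ring
    have hmod : ¬ (PySem.Int.mod v 2 = 0) := by
      rw [PySem.Int.mod_eq_emod_of_pos (by omega)]; omega
    rw [is_prime, if_neg (by omega), if_neg (by simp; omega)]
    simp only [beq_iff_eq, if_neg hmod]
    rw [show pyIsqrt v = n from pyIsqrt_sq_succ n hn]
    rw [show (isPrimeLoop v (PySem.List.pyRange 3 (n + 1) 2) = true) ↔
        ¬ (isPrimeLoop v (PySem.List.pyRange 3 (n + 1) 2) = false) from by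
      cases isPrimeLoop v (PySem.List.pyRange 3 (n + 1) 2) <;> simp]
    rw [isPrimeLoop_false_iff]
    apply not_congr
    constructor
    · rintro ⟨i, hmem, hmod0⟩
      rw [PySem.List.mem_pyRange_iff_of_pos (by omega)] at hmem
      exact ⟨i, by omega, by omega, (PySem.Int.mod_eq_zero_iff_dvd v i).mp hmod0⟩
    · rintro ⟨d, hd2, hdn, hdvd⟩
      have hdodd : d % 2 = 1 := by
        rcases Int.emod_two_eq d with h | h
        · exfalso
          obtain ⟨j, hj⟩ : (2:Int) ∣ d := Int.dvd_of_emod_eq_zero h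
          obtain ⟨t, ht⟩ := hdvd
          have : v = 2 * (j * t) := by rw [ht, hj]; ring
          omega
        · exact h
      refine ⟨d, ?_, (PySem.Int.mod_eq_zero_iff_dvd v d).mpr hdvd⟩
      rw [PySem.List.mem_pyRange_iff_of_pos (by omega)]
      exact ⟨by omega, by omega, by omega⟩

-- if the collector falls through the block, the result list is still short of m
lemma collectB_inr_lt (m : Int) (marked : PySem.Set Int) :
    ∀ (cs : List Int) (res res' : List Int), (res.length : Int) < m →
      collectB m marked res cs = Sum.inr res' → (res'.length : Int) < m := by
  intro cs
  induction cs with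
  | nil =>
    intro res res' hlt h
    simp only [collectB] at h
    cases h; exact hlt
  | cons n rest ih =>
    intro res res' hlt h
    simp only [collectB, beq_iff_eq] at h
    split_ifs at h with hc hm
    · exact ih res res' hlt h
    · refine ih _ res' ?_ h
      simp only [List.length_append, List.length_cons, List.length_nil] at hm ⊢
      push_cast at hm ⊢
      omega

-- driving A through one block of candidates equals B's collector on that block
lemma loopA_block (m lo hi : Int) (hlo : 1 ≤ lo) :
    ∀ (k : Nat) (f : Nat) (res : List Int) (n : Int), lo ≤ n → n + (k : Int) = hi →
      (res.length : Int) < m →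
      funcLoopA m res n (k + f) =
        (match collectB m (markBlock lo hi) res (PySem.List.pyRange n hi 1) with
         | Sum.inl fin => fin
         | Sum.inr res' => funcLoopA m res' hi f) := by
  intro k
  induction k with
  | zero =>
    intro f res n hln hnk hlt
    have hnh : n = hi := by push_cast at hnk; omega
    subst hnh
    rw [PySem.List.pyRange_one_eq_nil (le_refl n)]
    simp [collectB]
  | succ k ih =>
    intro f res n hln hnk hlt
    have hnlt : n < hi := by push_cast at hnk; omega
    rw [PySem.List.pyRange_one_cons hnlt]
    have hfuel : k + 1 + f = (k + f) + 1 := by omega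
    rw [hfuel]
    simp only [funcLoopA, if_pos hlt, collectB]
    have hn1 : 1 ≤ n := by omega
    have hmark : PySem.Set.contains (markBlock lo hi) n = true ↔ ¬ is_prime (n ^ 2 + 1) = true := by
      rw [PySem.Set.contains_iff, mem_markBlock lo hi n hn1 hln hnlt, is_prime_iff n hn1, not_not]
    by_cases hp : is_prime (n ^ 2 + 1) = true
    · -- unmarked: both append n*n+1
      have hcontains : ¬ PySem.Set.contains (markBlock lo hi) n = true := by
        rw [hmark]; exact not_not_intro hp
      rw [if_pos hp, if_neg hcontains, show (n:Int) ^ 2 + 1 = n * n + 1 from by ring]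
      by_cases hm : ((res ++ [n * n + 1]).length : Int) = m
      · rw [if_pos (beq_iff_eq.mpr hm)]
        exact loopA_stall m _ (n + 1) (k + f) (by omega)
      · rw [if_neg (by simp only [beq_iff_eq]; exact hm)]
        have hlt' : ((res ++ [n * n + 1]).length : Int) < m := by
          simp only [List.length_append, List.length_cons, List.length_nil] at hm ⊢
          push_cast at hm ⊢
          omega
        rw [ih f _ (n + 1) (by omega) (by push_cast at hnk ⊢; omega) hlt']
    · -- marked: both skip
      have hcontains : PySem.Set.contains (markBlock lo hi) n = true := by
        rw [hmark]; exact hp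
      rw [if_neg hp, if_pos hcontains]
      exact ih f res (n + 1) (by omega) (by push_cast at hnk ⊢; omega) hlt

-- block-by-block alignment of the two while-loops (fuel exhausts simultaneously)
lemma loopAB (m : Int) : ∀ (K : Nat) (s : Nat) (res : List Int) (lo : Int), 1 ≤ lo →
    (res.length : Int) < m →
    funcLoopA m res lo (blockFuel K s) = funcLoopB m res lo (s : Int) K := by
  intro K
  induction K with
  | zero => intro s res lo _ _; rfl
  | succ K ih =>
    intro s res lo hlo hlt
    rw [show blockFuel (K + 1) s = s + blockFuel K (2 * s) from rfl]
    rw [loopA_block m lo (lo + (s : Int)) hlo s (blockFuel K (2 * s)) res lo (le_refl lo)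
      rfl hlt]
    simp only [funcLoopB]
    cases hcol : collectB m (markBlock lo (lo + (s : Int))) res (PySem.List.pyRange lo (lo + (s : Int)) 1) with
    | inl fin => rfl
    | inr res' =>
      dsimp only
      have hlt' : (res'.length : Int) < m := collectB_inr_lt m _ _ res res' hlt hcol
      rw [ih (2 * s) res' (lo + (s : Int)) (by omega) hlt']
      have hcast : ((2 * s : Nat) : Int) = (s : Int) * 2 := by push_cast; ring
      rw [hcast]

-- ===== VERDICT (by name: the statement is the Claim_ definition above) =====
theorem func_spec : Claim_equal_func := by
  intro m _
  show func m = func_alt m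
  rw [func, func_alt]
  by_cases hm : m ≤ 0
  · rw [if_pos hm]
    exact loopA_stall m [] 1 _ (by simp; omega)
  · rw [if_neg hm]
    have := loopAB m 40 8 [] 1 (le_refl 1) (by simp; omega)
    simpa using this
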